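-- pv_equiv track=rewrite | github.com/C-Object-Configuration/COC-CPP-Toolkit | dev/util/path.py | getUpper
-- ===== SOURCE A (Python) =====
-- def forceBackwards(path:str) -> str:
--     new:str = ""
--
--     for char in path:
--         match char:
--             case "/": new += "\\"
--             case _: new += char
--
--     return new
--
-- def getUpper(source:str, index:int) -> str:
--     source = forceBackwards(source)
--
--     upper:str = ""
--     forwards:int = 0
--
--     for char in source:
--         if char == "\\":
--             forwards += 1
--
--     for char in source:
--         if char == "\\":
--             if forwards == index:
--                 return upper
--             forwards -= 1
--
--         upper += char
--
--     return upper
-- ===== SOURCE B (Python) =====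
-- def getUpper(source: str, index: int) -> str:
--     s = source.replace('/', '\\')
--     count = s.count('\\')
--     if index < 1 or count < index:
--         return s
--     return s.rsplit('\\', index)[0]
-- ===== Notes on version B (the rewrite author's own statement) =====
-- stated objective: simpler
-- what changed: A's three explicit char-by-char loops (slash conversion, backslash count, countdown scan with early return) are replaced by str.replace, str.count and a single rsplit('\', index)[0] cut from the end, with A's in-range guard made explicit.
import Mathlib
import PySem

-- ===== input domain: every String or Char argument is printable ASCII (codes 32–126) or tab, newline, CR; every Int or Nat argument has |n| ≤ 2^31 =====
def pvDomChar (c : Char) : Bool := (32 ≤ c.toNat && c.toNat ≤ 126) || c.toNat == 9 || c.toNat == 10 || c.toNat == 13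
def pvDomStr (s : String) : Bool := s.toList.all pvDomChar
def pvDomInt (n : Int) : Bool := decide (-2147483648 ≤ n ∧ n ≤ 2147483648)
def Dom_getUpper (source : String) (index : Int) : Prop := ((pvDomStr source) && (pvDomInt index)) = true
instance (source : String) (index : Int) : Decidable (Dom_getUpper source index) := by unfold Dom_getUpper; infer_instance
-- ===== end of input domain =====

-- B replaces A's three char-by-char loops (convert, count, countdown scan) by
-- str.replace / str.count and an rsplit-style cut from the end (objective: simpler decomposition).

-- ===== PORT A =====
def forceBackwards (path : String) : String :=
  String.ofList (path.toList.foldl (fun new c => new ++ [if c = '/' then '\\' else c]) [])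

def getUpperLoop (index : Int) (upper : List Char) (forwards : Int) : List Char → List Char
  | [] => upper
  | c :: t =>
    if c = '\\' then
      if forwards = index then upper
      else getUpperLoop index (upper ++ [c]) (forwards - 1) t
    else getUpperLoop index (upper ++ [c]) forwards t

def getUpper (source : String) (index : Int) : String :=
  let s := forceBackwards source
  let forwards : Int := s.toList.foldl (fun f c => if c = '\\' then f + 1 else f) 0
  String.ofList (getUpperLoop index [] forwards s.toList)

-- ===== PORT B =====
-- hand port of `s.rsplit('\\', k)[0]` for k in 1..count: scan the REVERSED character
-- list and drop through the k-th backslash; exact for a single-char separator.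
def dropSegR (k : Nat) : List Char → List Char
  | [] => []
  | c :: t => if c = '\\' then (if k = 1 then t else dropSegR (k - 1) t) else dropSegR k t

def getUpper_alt (source : String) (index : Int) : String :=
  let s := PySem.Str.replace source "/" "\\"
  let count : Int := (PySem.Str.count s "\\" : Int)
  if index < 1 ∨ count < index then s
  else String.ofList ((dropSegR index.toNat s.toList.reverse).reverse)

-- ===== PRECONDITION & SPEC =====
def Spec_getUpper (source : String) (index : Int) (out : String) : Prop := out = getUpper_alt source index
instance (source : String) (index : Int) (out : String) : Decidable (Spec_getUpper source index out) := by unfold Spec_getUpper; infer_instance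

-- ===== CLAIM (what is proved, stated in full; the proofs are below) =====
def Claim_equal_getUpper : Prop := ∀ (source : String) (index : Int), Dom_getUpper source index → Spec_getUpper source index (getUpper source index)

-- ===== LEMMAS AND PROOFS =====

-- slash→backslash conversion at char level
def pvConv (c : Char) : Char := if c = '/' then '\\' else c

-- spec of A's scan: cut at the backslash where the remaining backslash count equals index
def pvRes (index : Int) : List Char → List Char
  | [] => []
  | c :: t => if c = '\\' ∧ ((c :: t).count '\\' : Int) = index then [] else c :: pvRes index t

theorem pvCount_go_single (c : Char) : ∀ (fuel : Nat) (l : List Char) (acc : Nat),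
    l.length ≤ fuel → PySem.Chars.count.go [c] fuel l acc = acc + l.count c := by
  intro fuel
  induction fuel with
  | zero => intro l acc h; simp at h; subst h; simp [PySem.Chars.count.go]
  | succ n ih =>
    intro l acc h
    cases l with
    | nil => simp [PySem.Chars.count.go]
    | cons x t =>
      simp only [PySem.Chars.count.go, List.isPrefixOf]
      by_cases hx : c = x
      · subst hx
        simp only [beq_self_eq_true, Bool.true_and, if_true, List.length_cons,
          List.length_nil, List.drop_succ_cons, List.drop_zero, List.isPrefixOf,
          Nat.zero_add, ite_true, Bool.and_self, eq_self_iff_true]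
        rw [ih t (acc + 1) (by simpa using h), List.count_cons]
        simp; omega
      · have hb : (c == x) = false := by simp [hx]
        simp only [hb, Bool.false_and, Bool.false_eq_true, if_false]
        rw [ih t acc (by simpa using h), List.count_cons]
        have : ¬ (x = c) := fun he => hx he.symm
        simp [this]
theorem pvReplace_go_single (o n : Char) : ∀ (fuel : Nat) (l acc : List Char),
    l.length ≤ fuel → PySem.Chars.replace.go [o] [n] fuel l acc
      = acc.reverse ++ l.map (fun c => if c = o then n else c) := by
  intro fuel
  induction fuel with
  | zero => intro l acc h; simp at h; subst h; simp [PySem.Chars.replace.go]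
  | succ m ih =>
    intro l acc h
    cases l with
    | nil => simp [PySem.Chars.replace.go]
    | cons x t =>
      simp only [PySem.Chars.replace.go, List.isPrefixOf]
      by_cases hx : o = x
      · subst hx
        simp only [beq_self_eq_true, Bool.true_and, List.isPrefixOf, ite_true,
          Bool.and_self, if_true, List.length_cons, List.length_nil,
          List.drop_succ_cons, List.drop_zero]
        simp only [List.reverse_singleton, List.singleton_append]
        rw [ih t (n :: acc) (by simpa using h)]
        simp
      · have hb : (o == x) = false := by simp [hx]
        simp only [hb, Bool.false_and, Bool.false_eq_true, if_false]
        rw [ih t (x :: acc) (by simpa using h)]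
        have : ¬ (x = o) := fun he => hx he.symm
        simp [this]

theorem pvReplace_toList (source : String) :
    (PySem.Str.replace source "/" "\\").toList = source.toList.map pvConv := by
  rw [PySem.Str.toList_replace]
  show PySem.Chars.replace source.toList ['/'] ['\\'] = _
  rw [PySem.Chars.replace]
  simp only [List.isEmpty_cons, if_false, Bool.false_eq_true]
  rw [pvReplace_go_single '/' '\\' source.toList.length source.toList [] le_rfl]
  rfl

theorem pvForce_toList (source : String) :
    (forceBackwards source).toList = source.toList.map pvConv := by
  unfold forceBackwards
  have : ∀ (l acc : List Char), l.foldl (fun new c => new ++ [if c = '/' then '\\' else c]) acc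
      = acc ++ l.map pvConv := by
    intro l
    induction l with
    | nil => intro acc; simp
    | cons x t ih => intro acc; simp [List.foldl_cons, ih, pvConv]
  simp [this]

theorem pvCntSelf (t : List Char) : List.count '\\' ('\\' :: t) = List.count '\\' t + 1 := by
  simp

theorem pvCntNe (c : Char) (t : List Char) (h : ¬ c = '\\') :
    List.count '\\' (c :: t) = List.count '\\' t := by
  rw [List.count_cons]
  simp [h]

theorem pvLoop_eq_res (index : Int) : ∀ (l : List Char) (acc : List Char),
    getUpperLoop index acc (l.count '\\' : Int) l = acc ++ pvRes index l := by
  intro l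
  induction l with
  | nil => intro acc; simp [getUpperLoop, pvRes]
  | cons c t ih =>
    intro acc
    by_cases hc : c = '\\'
    · subst hc
      by_cases hi : ((List.count '\\' ('\\' :: t) : Int)) = index
      · have hi' : (List.count '\\' t : Int) + 1 = index := by
          rw [pvCntSelf] at hi; push_cast at hi; omega
        simp only [getUpperLoop, if_pos rfl, pvRes, pvCntSelf]
        simp [hi']
      · have hi' : ¬ ((List.count '\\' t : Int) + 1 = index) := by
          rw [pvCntSelf] at hi; push_cast at hi; omega
        simp only [getUpperLoop, if_pos rfl, pvRes, pvCntSelf, ite_true]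
        rw [show ((List.count '\\' t + 1 : Nat) : Int) = (List.count '\\' t : Int) + 1 by push_cast; ring]
        rw [if_neg hi',
          show (List.count '\\' t : Int) + 1 - 1 = (List.count '\\' t : Int) by ring,
          ih (acc ++ ['\\'])]
        simp [hi']
    · simp only [getUpperLoop, if_neg hc, pvCntNe c t hc]
      rw [ih (acc ++ [c])]
      have : ¬ (c = '\\' ∧ ((List.count '\\' (c :: t) : Int)) = index) := by
        rintro ⟨h1, _⟩; exact hc h1
      simp [pvRes, this]

theorem pvRes_out_of_range (index : Int) : ∀ (l : List Char),
    (index < 1 ∨ (l.count '\\' : Int) < index) → pvRes index l = l := by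
  intro l
  induction l with
  | nil => intro _; simp [pvRes]
  | cons c t ih =>
    intro h
    have hcnt : List.count '\\' t ≤ List.count '\\' (c :: t) := by
      by_cases hc : c = '\\'
      · subst hc; rw [pvCntSelf]; omega
      · rw [pvCntNe c t hc]
    have hne : ¬ (c = '\\' ∧ ((List.count '\\' (c :: t) : Int)) = index) := by
      rintro ⟨hc, he⟩
      subst hc
      rw [pvCntSelf] at he h
      push_cast at he h
      omega
    simp only [pvRes, if_neg hne]
    rw [ih (by omega)]

theorem pvDropSegR_append (k : Nat) (hk : 1 ≤ k) : ∀ (xs ys : List Char),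
    dropSegR k (xs ++ ys)
      = if k ≤ xs.count '\\' then dropSegR k xs ++ ys else dropSegR (k - xs.count '\\') ys := by
  induction k using Nat.strong_induction_on with
  | _ k ihk =>
  intro xs
  induction xs with
  | nil =>
    intro ys
    rw [if_neg (by simp; omega)]
    simp [dropSegR]
  | cons c t ih =>
    intro ys
    by_cases hc : c = '\\'
    · subst hc
      by_cases h1 : k = 1
      · subst h1
        rw [if_pos (by rw [pvCntSelf]; omega)]
        simp [dropSegR]
      · obtain ⟨m, rfl⟩ : ∃ m, k = m + 1 := ⟨k - 1, by omega⟩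
        have hm : 1 ≤ m := by omega
        simp only [List.cons_append, dropSegR, if_pos rfl, if_neg h1, pvCntSelf,
          ite_true, Nat.add_sub_cancel]
        rw [ihk m (by omega) hm t ys]
        by_cases hle : m ≤ List.count '\\' t
        · rw [if_pos hle, if_pos (by omega)]
        · rw [if_neg hle, if_neg (by omega)]
          congr 1
          omega
    · simp only [List.cons_append, dropSegR, if_neg hc, ih, pvCntNe c t hc]

theorem pvRes_in_range (index : Int) : ∀ (l : List Char),
    1 ≤ index → index ≤ (l.count '\\' : Int) →
    pvRes index l = (dropSegR index.toNat l.reverse).reverse := by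
  intro l
  induction l with
  | nil => intro _ _; simp [pvRes, dropSegR]
  | cons c t ih =>
    intro h1 h2
    have hk1 : 1 ≤ index.toNat := by omega
    have hcr : (t.reverse).count '\\' = t.count '\\' := List.count_reverse ..
    by_cases hc : c = '\\'
    · subst hc
      rw [pvCntSelf] at h2
      push_cast at h2
      by_cases hi : ((List.count '\\' ('\\' :: t) : Int)) = index
      · have hieq : index = (List.count '\\' t : Int) + 1 := by
          rw [pvCntSelf] at hi; push_cast at hi; omega
        have hlt : ¬ (index.toNat ≤ (t.reverse).count '\\') := by
          rw [hcr]; omega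
        have hcond : ('\\' : Char) = '\\' ∧ ((List.count '\\' ('\\' :: t) : Int)) = index :=
          ⟨rfl, hi⟩
        simp only [pvRes, if_pos hcond, List.reverse_cons,
          pvDropSegR_append index.toNat hk1, if_neg hlt]
        have hone : index.toNat - (t.reverse).count '\\' = 1 := by rw [hcr]; omega
        simp [hone, dropSegR]
        omega
      · have hle : index ≤ (List.count '\\' t : Int) := by
          rw [pvCntSelf] at hi; push_cast at hi; omega
        have hge : index.toNat ≤ (t.reverse).count '\\' := by rw [hcr]; omega
        have hnc : ¬ (('\\' : Char) = '\\' ∧ ((List.count '\\' ('\\' :: t) : Int)) = index) := by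
          rintro ⟨_, he⟩; exact hi he
        simp only [pvRes, if_neg hnc, List.reverse_cons,
          pvDropSegR_append index.toNat hk1, if_pos hge]
        rw [List.reverse_append, ih h1 hle]
        simp [dropSegR]
        rw [pvCntSelf] at hi
        push_cast at hi
        omega
    · have hcc : List.count '\\' (c :: t) = List.count '\\' t := pvCntNe c t hc
      rw [hcc] at h2
      have hge : index.toNat ≤ (t.reverse).count '\\' := by rw [hcr]; omega
      have hnc : ¬ (c = '\\' ∧ ((List.count '\\' (c :: t) : Int)) = index) := by
        rintro ⟨h, _⟩; exact hc h
      simp only [pvRes, if_neg hnc, List.reverse_cons,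
        pvDropSegR_append index.toNat hk1, if_pos hge]
      rw [List.reverse_append, ih h1 h2]
      simp

theorem pvCountLoop (l : List Char) :
    l.foldl (fun f c => if c = '\\' then f + 1 else f) (0 : Int) = (l.count '\\' : Int) := by
  have : ∀ (a : Int), l.foldl (fun f c => if c = '\\' then f + 1 else f) a = a + (l.count '\\' : Int) := by
    induction l with
    | nil => simp
    | cons x t ih =>
      intro a
      by_cases hx : x = '\\' <;> simp [hx, List.count_cons, ih] <;> push_cast <;> ring
  simpa using this 0

theorem pvStrCount (s : String) : PySem.Str.count s "\\" = s.toList.count '\\' := by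
  rw [PySem.Str.count_eq]
  show PySem.Chars.count s.toList ['\\'] = _
  rw [PySem.Chars.count]
  simp only [List.isEmpty_cons, Bool.false_eq_true, if_false]
  rw [pvCount_go_single '\\' s.toList.length s.toList 0 le_rfl]
  simp

-- ===== VERDICT (by name: the statement is the Claim_ definition above) =====
theorem getUpper_spec : Claim_equal_getUpper := by
  intro source index _
  unfold Spec_getUpper getUpper getUpper_alt
  simp only [pvForce_toList, pvReplace_toList, pvCountLoop, pvStrCount, pvLoop_eq_res,
    List.nil_append]
  by_cases h : index < 1 ∨ ((source.toList.map pvConv).count '\\' : Int) < index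
  · rw [if_pos h, pvRes_out_of_range index _ h, ← pvReplace_toList source,
      String.ofList_toList]
  · rw [if_neg h]
    push_neg at h
    rw [pvRes_in_range index _ (by omega) (by omega)]
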